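-- pv_equiv track=rewrite | github.com/Gulin7/university-projects | Semester 1 (1st year)/Computational Logic/Optional_hw_12_dec/root/services/functions.py | check_number_and_base
-- ===== SOURCE A (Python) =====
-- def check_number_and_base(number, base):
--     """
--     Checks if a number is in base "base".
--
--     :param number: the given number
--     :param base: the given base
--     :return: True if number is in base "base", false otherwise
--     """
--     try:
--         copy = int(number)
--     except:
--         return False
--     while copy > 0:
--         digit = copy % 10
--         if digit > 10:
--             return False
--         if digit >= base:
--             return False
--         copy = copy // 10
--     return True
-- ===== SOURCE B (Python) =====
-- def check_number_and_base(number, base):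
--     """Checks that every decimal digit of the number is below the given base."""
--     try:
--         copy = int(number)
--     except:
--         return False
--     if copy <= 0:
--         return True
--     return all(int(d) < base for d in str(copy))
-- ===== Notes on version B (the rewrite author's own statement) =====
-- stated objective: idiomatic
-- what changed: B reads the digits from the decimal string form with all(int(d) < base for d in str(copy)) instead of A's arithmetic %10 // 10 peeling loop, and drops A's dead digit > 10 branch.
import Mathlib
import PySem

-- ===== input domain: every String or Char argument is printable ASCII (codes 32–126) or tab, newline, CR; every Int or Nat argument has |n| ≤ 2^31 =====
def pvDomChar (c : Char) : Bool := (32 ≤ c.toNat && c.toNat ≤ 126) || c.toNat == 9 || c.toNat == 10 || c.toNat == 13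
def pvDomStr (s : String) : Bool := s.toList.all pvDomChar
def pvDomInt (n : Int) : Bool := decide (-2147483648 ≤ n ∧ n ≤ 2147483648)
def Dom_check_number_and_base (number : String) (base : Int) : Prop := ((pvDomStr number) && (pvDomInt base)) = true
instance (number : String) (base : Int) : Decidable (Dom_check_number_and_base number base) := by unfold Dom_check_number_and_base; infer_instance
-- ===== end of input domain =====

-- B reads the digits from the decimal string form of the number instead of A's arithmetic %10 // 10 peeling loop (idiomatic; A's dead `digit > 10` branch is dropped).

-- ===== PORT A =====
-- the `while copy > 0` loop of A step for step
def pvLoopA (copy base : Int) : Bool :=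
  if _h : 0 < copy then
    let digit := PySem.Int.mod copy 10
    if digit > 10 then false
    else if digit ≥ base then false
    else pvLoopA (PySem.Int.floordiv copy 10) base
  else true
termination_by copy.toNat
decreasing_by
  rw [PySem.Int.floordiv_eq_ediv_of_pos (by omega)]
  omega

def check_number_and_base (number : String) (base : Int) : Bool :=
  match PySem.Int.ofStr? number with
  | none => false                 -- except: return False
  | some copy => pvLoopA copy base

-- ===== PORT B =====
def check_number_and_base_alt (number : String) (base : Int) : Bool :=
  match PySem.Int.ofStr? number with
  | none => false                 -- except: return False
  | some copy =>
    if copy ≤ 0 then true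
    else
      -- all(int(d) < base for d in str(copy)); int(d) of a decimal digit char
      -- is exactly its code point minus 48 (str(copy) of a positive int is all '0'-'9')
      (PySem.Int.toChars copy).all (fun d => decide (((d.toNat : Int) - 48) < base))

-- ===== PRECONDITION & SPEC =====
def Spec_check_number_and_base (number : String) (base : Int) (out : Bool) : Prop := out = check_number_and_base_alt number base
instance (number : String) (base : Int) (out : Bool) : Decidable (Spec_check_number_and_base number base out) := by unfold Spec_check_number_and_base; infer_instance

-- ===== CLAIM (what is proved, stated in full; the proofs are below) =====
def Claim_equal_check_number_and_base : Prop := ∀ (number : String) (base : Int), Dom_check_number_and_base number base → Spec_check_number_and_base number base (check_number_and_base number base)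

-- ===== LEMMAS AND PROOFS =====

-- int(d) of the digit character of d < 10 is d itself
lemma pvDigitChar_val (d : Nat) (h : d < 10) :
    ((Nat.digitChar d).toNat : Int) - 48 = (d : Int) := by
  interval_cases d <;> decide

-- A's loop computes exactly B's all-digits test, for positive numbers
lemma pvLoopA_eq_all (n : Nat) (hn : 0 < n) (base : Int) :
    pvLoopA (n : Int) base
      = (Nat.toDigits 10 n).all (fun d => decide (((d.toNat : Int) - 48) < base)) := by
  induction n using Nat.strong_induction_on with
  | _ n ih =>
    rw [pvLoopA]
    rw [dif_pos (by exact_mod_cast hn)]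
    have hmod : PySem.Int.mod (n : Int) 10 = ((n % 10 : Nat) : Int) := by
      exact_mod_cast PySem.Int.mod_natCast n 10
    have hdiv : PySem.Int.floordiv (n : Int) 10 = ((n / 10 : Nat) : Int) := by
      exact_mod_cast PySem.Int.floordiv_natCast n 10
    have hm10 : n % 10 < 10 := Nat.mod_lt _ (by omega)
    rw [Nat.toDigits_eq_if (by omega)]
    by_cases hsmall : n < 10
    · rw [if_pos hsmall]
      have hmodn : n % 10 = n := Nat.mod_eq_of_lt hsmall
      have hdivn : n / 10 = 0 := Nat.div_eq_of_lt hsmall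
      rw [pvLoopA]   -- the recursive call on 0 returns true
      simp only [hmod, hdiv, hmodn, hdivn, List.all_cons, List.all_nil,
        pvDigitChar_val n hsmall, Nat.cast_zero, Bool.and_true]
      have h10 : ¬ ((n : Int) > 10) := by omega
      rw [if_neg h10, dif_neg (by omega)]
      by_cases hb : (n : Int) ≥ base
      · rw [if_pos hb]
        simp only [false_eq_decide_iff, not_lt]
        exact hb
      · rw [if_neg hb]
        simp only [true_eq_decide_iff]
        omega
    · rw [if_neg hsmall]
      have hdpos : 0 < n / 10 := Nat.div_pos (by omega) (by omega)
      rw [List.all_append]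
      rw [← ih (n / 10) (by omega) hdpos]
      simp only [hmod, hdiv, List.all_cons, List.all_nil, Bool.and_true,
        pvDigitChar_val (n % 10) hm10]
      have h10 : ¬ (((n % 10 : Nat) : Int) > 10) := by omega
      rw [if_neg h10]
      by_cases hb : ((n % 10 : Nat) : Int) ≥ base
      · rw [if_pos hb]
        have hd : decide (((n % 10 : Nat) : Int) < base) = false := by
          simp only [decide_eq_false_iff_not]; omega
        rw [hd, Bool.and_false]
      · rw [if_neg hb]
        have hd : decide (((n % 10 : Nat) : Int) < base) = true := by
          simp only [decide_eq_true_eq]; omega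
        rw [hd, Bool.and_true]

-- ===== VERDICT (by name: the statement is the Claim_ definition above) =====
theorem check_number_and_base_spec : Claim_equal_check_number_and_base := by
  intro number base _
  unfold Spec_check_number_and_base check_number_and_base check_number_and_base_alt
  cases h : PySem.Int.ofStr? number with
  | none => rfl
  | some copy =>
    dsimp only
    by_cases hc : copy ≤ 0
    · rw [if_pos hc, pvLoopA, dif_neg (by omega)]
    · rw [if_neg hc]
      have h0 : (0 : Int) < copy := by omega
      have hcn : copy = ((copy.toNat : Nat) : Int) := by omega
      rw [hcn, pvLoopA_eq_all copy.toNat (by omega) base]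
      simp only [PySem.Int.toChars]
      rw [if_neg (by omega)]
      congr 1
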